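-- pv_equiv track=rewrite | github.com/ankuratfracto/iwealth | iwe_core/excel_ops.py | expand_selected_pages
-- ===== SOURCE A (Python) =====
-- def expand_selected_pages(selected_pages: list[int], total_pages: int, radius: int = 1) -> list[int]:
--     """Expand selected page numbers by a small neighbour radius (clamped)."""
--     s = set()
--     for p in selected_pages or []:
--         for d in range(-radius, radius + 1):
--             q = p + d
--             if 1 <= q <= max(1, int(total_pages)):
--                 s.add(q)
--     return sorted(s)
-- ===== SOURCE B (Python) =====
-- def expand_selected_pages(selected_pages: list[int], total_pages: int, radius: int = 1) -> list[int]: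
--     """Expand selected page numbers by a small neighbour radius (clamped).
--
--     Interval-merge re-implementation: walk the distinct centres in sorted
--     order and emit each clamped interval's not-yet-emitted suffix directly,
--     so the output is built already sorted and deduplicated."""
--     upper = max(1, int(total_pages))
--     out = []
--     last = 0  # largest page emitted so far
--     for c in sorted(set(selected_pages or [])):
--         lo = max(1, c - radius, last + 1)
--         hi = min(upper, c + radius)
--         out.extend(range(lo, hi + 1))
--         if hi >= lo:
--             last = hi
--     return out
-- ===== Notes on version B (the rewrite author's own statement) =====
-- stated objective: faster
-- what changed: Replaces per-point insertion of every one of the 2r+1 neighbours into a set plus a final sort with a single sweep over the sorted distinct centres that emits each clamped interval's not-yet-emitted suffix directly in order, so work no longer scales with the radius times the point count but with the centres plus the output size.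
import Mathlib
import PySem

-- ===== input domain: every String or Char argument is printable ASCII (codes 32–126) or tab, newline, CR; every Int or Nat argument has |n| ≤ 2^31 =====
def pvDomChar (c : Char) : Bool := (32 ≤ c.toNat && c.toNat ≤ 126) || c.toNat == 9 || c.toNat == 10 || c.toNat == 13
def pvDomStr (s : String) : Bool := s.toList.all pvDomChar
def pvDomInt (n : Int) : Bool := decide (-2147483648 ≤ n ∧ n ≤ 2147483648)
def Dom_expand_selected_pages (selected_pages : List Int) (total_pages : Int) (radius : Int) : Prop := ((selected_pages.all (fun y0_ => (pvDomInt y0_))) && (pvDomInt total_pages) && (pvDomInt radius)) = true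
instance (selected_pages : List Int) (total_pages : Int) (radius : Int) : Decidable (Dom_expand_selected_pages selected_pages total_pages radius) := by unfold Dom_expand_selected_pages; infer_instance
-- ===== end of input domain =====

-- B replaces A's per-point set insertion of every neighbour plus a final sort by a single
-- sweep over the sorted distinct centres that emits merged clamped intervals already in order
-- (objective: alternative algorithm, same result).

-- ===== PORT A =====
def expand_selected_pages (selected_pages : List Int) (total_pages : Int) (radius : Int) : List Int :=
  -- s = set(); for p in selected_pages or []: for d in range(-radius, radius+1):
  --   q = p + d; if 1 <= q <= max(1, int(total_pages)): s.add(q)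
  let s : PySem.Set Int :=
    selected_pages.foldl (fun s p =>
      (PySem.List.pyRange (-radius) (radius + 1)).foldl (fun s d =>
        if 1 ≤ p + d ∧ p + d ≤ max 1 total_pages then PySem.Set.add s (p + d) else s) s)
      PySem.Set.empty
  PySem.List.sorted s (fun x => x)

-- ===== PORT B =====
-- loop body of Source B: state is (out, last)
def pvStepB (upper radius : Int) (st : List Int × Int) (c : Int) : List Int × Int :=
  let lo := max (max 1 (c - radius)) (st.2 + 1)
  let hi := min upper (c + radius)
  (st.1 ++ PySem.List.pyRange lo (hi + 1), if hi ≥ lo then hi else st.2)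

def expand_selected_pages_alt (selected_pages : List Int) (total_pages : Int) (radius : Int) : List Int :=
  let upper := max 1 total_pages
  ((PySem.List.sorted (PySem.Set.ofList selected_pages) (fun x => x)).foldl
      (pvStepB upper radius) ([], 0)).1

-- ===== PRECONDITION & SPEC =====
def Spec_expand_selected_pages (selected_pages : List Int) (total_pages : Int) (radius : Int) (out : List Int) : Prop := out = expand_selected_pages_alt selected_pages total_pages radius
instance (selected_pages : List Int) (total_pages : Int) (radius : Int) (out : List Int) : Decidable (Spec_expand_selected_pages selected_pages total_pages radius out) := by unfold Spec_expand_selected_pages; infer_instance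

-- ===== CLAIM (what is proved, stated in full; the proofs are below) =====
def Claim_equal_expand_selected_pages : Prop := ∀ (selected_pages : List Int) (total_pages : Int) (radius : Int), Dom_expand_selected_pages selected_pages total_pages radius → Spec_expand_selected_pages selected_pages total_pages radius (expand_selected_pages selected_pages total_pages radius)

-- ===== LEMMAS AND PROOFS =====

-- canonical form both ports are proved equal to: the pages 1..U covered by some centre
def pvCovB (sel : List Int) (r q : Int) : Bool := sel.any (fun p => decide (p - r ≤ q) && decide (q ≤ p + r))

def pvCanon (sel : List Int) (U r : Int) : List Int :=
  (PySem.List.pyRange 1 (U + 1)).filter (fun q => pvCovB sel r q)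

lemma pvCovB_cons (c : Int) (cs : List Int) (r q : Int) :
    (pvCovB (c :: cs) r q = true) ↔ ((c - r ≤ q ∧ q ≤ c + r) ∨ pvCovB cs r q = true) := by
  simp [pvCovB]

-- ---------- A side ----------

lemma pv_inner_mem (U p : Int) (L : List Int) :
    ∀ (s : PySem.Set Int) (q : Int),
      (q ∈ L.foldl (fun s d =>
          if 1 ≤ p + d ∧ p + d ≤ U then PySem.Set.add s (p + d) else s) s) ↔
        q ∈ s ∨ ∃ d ∈ L, q = p + d ∧ 1 ≤ q ∧ q ≤ U := by
  induction L with
  | nil => intro s q; simp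
  | cons d L ih =>
    intro s q
    simp only [List.foldl_cons]
    rw [ih]
    by_cases h : 1 ≤ p + d ∧ p + d ≤ U
    · rw [if_pos h]
      simp only [PySem.Set.mem_add, List.mem_cons]
      constructor
      · rintro (⟨hs | rfl⟩ | ⟨d', hd', rfl, hb⟩)
        · exact Or.inl hs
        · exact Or.inr ⟨d, Or.inl rfl, rfl, h⟩
        · exact Or.inr ⟨d', Or.inr hd', rfl, hb⟩
      · rintro (hs | ⟨d', (rfl | hd'), rfl, hb⟩)
        · exact Or.inl (Or.inl hs)
        · exact Or.inl (Or.inr rfl)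
        · exact Or.inr ⟨d', hd', rfl, hb⟩
    · rw [if_neg h]
      simp only [List.mem_cons]
      constructor
      · rintro (hs | ⟨d', hd', rfl, hb⟩)
        · exact Or.inl hs
        · exact Or.inr ⟨d', Or.inr hd', rfl, hb⟩
      · rintro (hs | ⟨d', (rfl | hd'), rfl, hb⟩)
        · exact Or.inl hs
        · exact absurd hb h
        · exact Or.inr ⟨d', hd', rfl, hb⟩

lemma pv_inner_nodup (U p : Int) (L : List Int) :
    ∀ (s : PySem.Set Int), s.Nodup →
      (L.foldl (fun s d =>
          if 1 ≤ p + d ∧ p + d ≤ U then PySem.Set.add s (p + d) else s) s).Nodup := by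
  induction L with
  | nil => intro s hs; exact hs
  | cons d L ih =>
    intro s hs
    simp only [List.foldl_cons]
    apply ih
    by_cases h : 1 ≤ p + d ∧ p + d ≤ U
    · rw [if_pos h]; exact PySem.Set.nodup_add _ _ hs
    · rw [if_neg h]; exact hs

lemma pv_outer_mem (U r : Int) (sel : List Int) :
    ∀ (s : PySem.Set Int) (q : Int),
      (q ∈ sel.foldl (fun s p =>
          (PySem.List.pyRange (-r) (r + 1)).foldl (fun s d =>
            if 1 ≤ p + d ∧ p + d ≤ U then PySem.Set.add s (p + d) else s) s) s) ↔
        q ∈ s ∨ ((1 ≤ q ∧ q ≤ U) ∧ ∃ p ∈ sel, p - r ≤ q ∧ q ≤ p + r) := by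
  induction sel with
  | nil => intro s q; simp
  | cons p sel ih =>
    intro s q
    simp only [List.foldl_cons]
    rw [ih, pv_inner_mem]
    constructor
    · rintro ((hs | ⟨d, hd, rfl, hb⟩) | ⟨hb, p', hp', hc⟩)
      · exact Or.inl hs
      · rw [PySem.List.mem_pyRange_one] at hd
        exact Or.inr ⟨hb, p, List.mem_cons_self .., by omega⟩
      · exact Or.inr ⟨hb, p', List.mem_cons_of_mem _ hp', hc⟩
    · rintro (hs | ⟨hb, p', hp', hc⟩)
      · exact Or.inl (Or.inl hs)
      · rcases List.mem_cons.1 hp' with rfl | hp'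
        · refine Or.inl (Or.inr ⟨q - p', ?_, by omega, hb⟩)
          rw [PySem.List.mem_pyRange_one]; omega
        · exact Or.inr ⟨hb, p', hp', hc⟩

lemma pv_outer_nodup (U r : Int) (sel : List Int) :
    ∀ (s : PySem.Set Int), s.Nodup →
      (sel.foldl (fun s p =>
          (PySem.List.pyRange (-r) (r + 1)).foldl (fun s d =>
            if 1 ≤ p + d ∧ p + d ≤ U then PySem.Set.add s (p + d) else s) s) s).Nodup := by
  induction sel with
  | nil => intro s hs; exact hs
  | cons p sel ih =>
    intro s hs
    simp only [List.foldl_cons]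
    exact ih _ (pv_inner_nodup U p _ s hs)

lemma pvCanon_pairwise (sel : List Int) (U r : Int) :
    (pvCanon sel U r).Pairwise (· < ·) :=
  (PySem.List.pairwise_lt_pyRange_one 1 (U + 1)).filter _

lemma pvCanon_mem (sel : List Int) (U r q : Int) :
    q ∈ pvCanon sel U r ↔ (1 ≤ q ∧ q ≤ U) ∧ ∃ p ∈ sel, p - r ≤ q ∧ q ≤ p + r := by
  simp only [pvCanon, List.mem_filter, PySem.List.mem_pyRange_one, pvCovB, List.any_eq_true,
    Bool.and_eq_true, decide_eq_true_eq]
  constructor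
  · rintro ⟨⟨h1, h2⟩, p, hp, hc⟩; exact ⟨⟨h1, by omega⟩, p, hp, hc⟩
  · rintro ⟨⟨h1, h2⟩, p, hp, hc⟩; exact ⟨⟨h1, by omega⟩, p, hp, hc⟩

lemma pvA_eq_canon (sel : List Int) (total r : Int) :
    expand_selected_pages sel total r = pvCanon sel (max 1 total) r := by
  unfold expand_selected_pages
  apply PySem.List.sorted_eq_of_perm_of_pairwise_lt
  · refine (List.perm_ext_iff_of_nodup ((pvCanon_pairwise sel (max 1 total) r).imp ne_of_lt) ?_).2 ?_
    · exact pv_outer_nodup _ r sel PySem.Set.empty List.nodup_nil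
    · intro q
      rw [pvCanon_mem, pv_outer_mem]
      simp [PySem.Set.empty]
  · exact pvCanon_pairwise sel (max 1 total) r

-- ---------- B side ----------

lemma pv_filter_interval (lo hi : Int) :
    ∀ (n : Nat) (a b : Int), (b - a).toNat = n →
      (PySem.List.pyRange a b).filter (fun q => decide (lo ≤ q) && decide (q ≤ hi)) =
        PySem.List.pyRange (max a lo) (min b (hi + 1)) := by
  intro n
  induction n with
  | zero =>
    intro a b h
    have hba : b ≤ a := by omega
    rw [PySem.List.pyRange_one_eq_nil hba,
      PySem.List.pyRange_one_eq_nil (le_trans (min_le_left _ _) (le_trans hba (le_max_left _ _)))]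
    rfl
  | succ n ih =>
    intro a b h
    have hab : a < b := by omega
    rw [PySem.List.pyRange_one_cons hab]
    by_cases h1 : lo ≤ a
    · by_cases h2 : a ≤ hi
      · rw [List.filter_cons_of_pos (by simp [h1, h2]), ih (a + 1) b (by omega)]
        have e1 : max a lo = a := by omega
        have e2 : max (a + 1) lo = a + 1 := by omega
        have e3 : a < min b (hi + 1) := by omega
        rw [e1, e2, PySem.List.pyRange_one_cons e3]
      · rw [List.filter_cons_of_neg (by simp; omega), ih (a + 1) b (by omega)]
        -- a > hi: both ranges are empty
        rw [PySem.List.pyRange_one_eq_nil (by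
            refine le_trans (min_le_right _ _) (le_trans ?_ (le_max_left _ _)); omega),
          PySem.List.pyRange_one_eq_nil (by
            refine le_trans (min_le_right _ _) (le_trans ?_ (le_max_left _ _)); omega)]
    · rw [List.filter_cons_of_neg (by simp; omega), ih (a + 1) b (by omega)]
      have e1 : max a lo = lo := by omega
      have e2 : max (a + 1) lo = lo := by omega
      rw [e1, e2]

lemma pvStepB_eq (U r last : Int) (out : List Int) (c : Int) :
    pvStepB U r (out, last) c =
      (out ++ PySem.List.pyRange (max (max 1 (c - r)) (last + 1)) (min U (c + r) + 1),
       if min U (c + r) ≥ max (max 1 (c - r)) (last + 1) then min U (c + r) else last) := rfl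

lemma pv_loopB (U r : Int) (_hU : 1 ≤ U) :
    ∀ (cs : List Int) (P : Int → Bool) (out : List Int) (last : Int),
      cs.Pairwise (· ≤ ·) →
      0 ≤ last → last ≤ U →
      (∀ q, P q = true → 1 ≤ q ∧ q ≤ last) →
      (∀ c ∈ cs, ∀ q, 1 ≤ q → c - r ≤ q → q ≤ last → P q = true) →
      out = (PySem.List.pyRange 1 (U + 1)).filter P →
      (cs.foldl (pvStepB U r) (out, last)).1 =
        (PySem.List.pyRange 1 (U + 1)).filter (fun q => P q || pvCovB cs r q) := by
  intro cs
  induction cs with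
  | nil =>
    intro P out last _ _ _ _ _ hout
    simp only [List.foldl_nil]
    rw [hout]
    apply List.filter_congr
    intro q _
    simp [pvCovB]
  | cons c cs ih =>
    intro P out last hpw hl0 hlU hP hcov hout
    have hpw' : cs.Pairwise (· ≤ ·) := hpw.of_cons
    have hle : ∀ c' ∈ cs, c ≤ c' := fun c' h => List.rel_of_pairwise_cons hpw h
    simp only [List.foldl_cons]
    rw [pvStepB_eq]
    set A := max 1 (c - r) with hA
    set lo := max A (last + 1) with hlo
    set hi := min U (c + r) with hhi
    have hA1 : (1 : Int) ≤ A := le_max_left _ _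
    have hA2 : c - r ≤ A := le_max_right _ _
    have hAq : ∀ q, 1 ≤ q → c - r ≤ q → A ≤ q := fun q u v => max_le u v
    have hlo1 : A ≤ lo := le_max_left _ _
    have hlo2 : last + 1 ≤ lo := le_max_right _ _
    have hlo3 : lo = A ∨ lo = last + 1 := max_choice _ _
    have hhi1 : hi ≤ U := min_le_left _ _
    have hhi2 : hi ≤ c + r := min_le_right _ _
    have hhiq : ∀ q, q ≤ U → q ≤ c + r → q ≤ hi := fun q u v => le_min u v
    set last' := if hi ≥ lo then hi else last with hlast'
    have hlast'_ge : last ≤ last' := by rw [hlast']; split <;> omega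
    have hlast'U : last' ≤ U := by rw [hlast']; split <;> omega
    have hlast'hi : ∀ q, A ≤ q → q ≤ hi → q ≤ last' := by
      intro q hq1 hq2
      rw [hlast']
      split
      · exact hq2
      · rename_i hni
        -- interval empty: lo > hi, but A ≤ q ≤ hi < lo so lo = last + 1
        rcases hlo3 with he | he <;> omega
    set P' : Int → Bool := fun q => P q || (decide (A ≤ q) && decide (q ≤ hi)) with hP'
    have hP'iff : ∀ q, P' q = true ↔ (P q = true ∨ (A ≤ q ∧ q ≤ hi)) := by
      intro q; rw [hP']; simp
    have hP'b : ∀ q, P' q = true → 1 ≤ q ∧ q ≤ last' := by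
      intro q hq
      rcases (hP'iff q).1 hq with hq | ⟨hq1, hq2⟩
      · have := hP q hq; omega
      · exact ⟨by omega, hlast'hi q hq1 hq2⟩
    have hcov' : ∀ c' ∈ cs, ∀ q, 1 ≤ q → c' - r ≤ q → q ≤ last' → P' q = true := by
      intro c' hc' q h1 h2 h3
      have hcc' : c ≤ c' := hle c' hc'
      by_cases hql : q ≤ last
      · have : P q = true := hcov c (List.mem_cons_self ..) q h1 (by omega) hql
        exact (hP'iff q).2 (Or.inl this)
      · refine (hP'iff q).2 (Or.inr ⟨hAq q h1 (by omega), ?_⟩)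
        rw [hlast'] at h3
        split at h3 <;> omega
    have hout' : out ++ PySem.List.pyRange lo (hi + 1) =
        (PySem.List.pyRange 1 (U + 1)).filter P' := by
      have hsplit : PySem.List.pyRange 1 (U + 1) =
          PySem.List.pyRange 1 (last + 1) ++ PySem.List.pyRange (last + 1) (U + 1) :=
        PySem.List.pyRange_one_append 1 (last + 1) (U + 1) (by omega) (by omega)
      have hPpart2 : (PySem.List.pyRange (last + 1) (U + 1)).filter P = [] := by
        rw [List.filter_eq_nil_iff]
        intro q hq hPq
        rw [PySem.List.mem_pyRange_one] at hq
        have := hP q hPq; omega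
      have hP'part1 : (PySem.List.pyRange 1 (last + 1)).filter P' =
          (PySem.List.pyRange 1 (last + 1)).filter P := by
        apply List.filter_congr
        intro q hq
        rw [PySem.List.mem_pyRange_one] at hq
        rw [Bool.eq_iff_iff, hP'iff]
        constructor
        · rintro (h | ⟨h1, h2⟩)
          · exact h
          · exact hcov c (List.mem_cons_self ..) q (by omega) (by omega) (by omega)
        · exact Or.inl
      have hP'part2 : (PySem.List.pyRange (last + 1) (U + 1)).filter P' =
          PySem.List.pyRange lo (hi + 1) := by
        have heq : (PySem.List.pyRange (last + 1) (U + 1)).filter P' =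
            (PySem.List.pyRange (last + 1) (U + 1)).filter
              (fun q => decide (A ≤ q) && decide (q ≤ hi)) := by
          apply List.filter_congr
          intro q hq
          rw [PySem.List.mem_pyRange_one] at hq
          rw [Bool.eq_iff_iff, hP'iff]
          simp only [Bool.and_eq_true, decide_eq_true_eq]
          constructor
          · rintro (h | h)
            · have := hP q h; omega
            · exact h
          · exact Or.inr
        rw [heq, pv_filter_interval A hi ((U + 1) - (last + 1)).toNat (last + 1) (U + 1) rfl]
        have e1 : max (last + 1) A = lo := by rw [hlo]; omega
        have e2 : min (U + 1) (hi + 1) = hi + 1 := by omega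
        rw [e1, e2]
      have houtp : out = (PySem.List.pyRange 1 (last + 1)).filter P := by
        rw [hout, hsplit, List.filter_append, hPpart2, List.append_nil]
      rw [hsplit, List.filter_append, hP'part1, hP'part2, houtp]
    have hfin := ih P' (out ++ PySem.List.pyRange lo (hi + 1)) last'
      hpw' (by omega) hlast'U hP'b hcov' hout'
    rw [hfin]
    apply List.filter_congr
    intro q hq
    rw [PySem.List.mem_pyRange_one] at hq
    rw [Bool.eq_iff_iff]
    simp only [Bool.or_eq_true, hP'iff, pvCovB_cons]
    constructor
    · rintro ((h | ⟨h1, h2⟩) | h)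
      · exact Or.inl h
      · exact Or.inr (Or.inl ⟨by omega, by omega⟩)
      · exact Or.inr (Or.inr h)
    · rintro (h | (⟨h1, h2⟩ | h))
      · exact Or.inl (Or.inl h)
      · exact Or.inl (Or.inr ⟨hAq q (by omega) h1, hhiq q (by omega) h2⟩)
      · exact Or.inr h

lemma pvB_eq_canon (sel : List Int) (total r : Int) :
    expand_selected_pages_alt sel total r = pvCanon sel (max 1 total) r := by
  unfold expand_selected_pages_alt
  have hpw : (PySem.List.sorted (PySem.Set.ofList sel) (fun x => x)).Pairwise (· ≤ ·) :=
    PySem.List.sorted_pairwise _ _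
  have h := pv_loopB (max 1 total) r (le_max_left _ _)
    (PySem.List.sorted (PySem.Set.ofList sel) (fun x => x)) (fun _ => false) [] 0 hpw
    le_rfl (le_trans zero_le_one (le_max_left _ _))
    (by intro q h; simp at h) (by intro c _ q _ _ h; omega)
    (List.filter_false _).symm
  rw [h]
  apply List.filter_congr
  intro q _
  rw [Bool.false_or, Bool.eq_iff_iff]
  simp only [pvCovB, List.any_eq_true, PySem.List.mem_sorted, PySem.Set.mem_ofList]

-- ===== VERDICT (by name: the statement is the Claim_ definition above) =====
theorem expand_selected_pages_spec : Claim_equal_expand_selected_pages := by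
  intro sel total r _
  unfold Spec_expand_selected_pages
  rw [pvA_eq_canon, pvB_eq_canon]
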